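-- pv_equiv track=rewrite | github.com/MORImementos/mssb-training-mode | binary/main.py | encode_pitch_input
-- ===== SOURCE A (Python) =====
-- def encode_pitch_input(value):
--     encoded_value = 0
--     for i, v in enumerate(value):
--         if v == 0:
--             encoded_value |= (0b00 << (2 * i))
--         elif v == 1:
--             encoded_value |= (0b01 << (2 * i))
--         elif v == -1:
--             encoded_value |= (0b11 << (2 * i))
--         else:
--             raise ValueError("Invalid pitch input value.")
--     return encoded_value
-- ===== SOURCE B (Python) =====
-- def encode_pitch_input(value):
--     encoded = 0
--     for v in reversed(list(value)):
--         if v == 0: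
--             code = 0b00
--         elif v == 1:
--             code = 0b01
--         elif v == -1:
--             code = 0b11
--         else:
--             raise ValueError("Invalid pitch input value.")
--         encoded = (encoded << 2) | code
--     return encoded
-- ===== Notes on version B (the rewrite author's own statement) =====
-- stated objective: alternative
-- what changed: Replaces A's enumerate loop that ORs each 2-bit code into position 2*i with a Horner-style accumulator over the reversed list: encoded = (encoded << 2) | code, so no per-element shift amount is tracked.
import Mathlib
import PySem

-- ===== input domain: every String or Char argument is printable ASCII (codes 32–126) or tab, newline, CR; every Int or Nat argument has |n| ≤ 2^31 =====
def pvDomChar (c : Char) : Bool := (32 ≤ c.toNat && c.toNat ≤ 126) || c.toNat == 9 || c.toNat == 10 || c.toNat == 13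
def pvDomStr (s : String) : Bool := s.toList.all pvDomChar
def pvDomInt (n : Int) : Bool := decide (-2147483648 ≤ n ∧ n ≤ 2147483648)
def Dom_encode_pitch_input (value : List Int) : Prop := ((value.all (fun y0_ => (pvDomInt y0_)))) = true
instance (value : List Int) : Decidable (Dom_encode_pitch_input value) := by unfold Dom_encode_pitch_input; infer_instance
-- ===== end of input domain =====

-- B replaces A's positional-shift OR loop with a Horner-style accumulator over the reversed list (alternative decomposition, same cost).


-- ===== PORT A =====
-- the 'for i, v in enumerate(value)' loop; the final 'else' is Python's 'raise ValueError',
-- excluded by Pre_encode_pitch_input (the loop aborts, returning nothing — value here is arbitrary)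
def encAgo : List Int → Nat → Int → Int
  | [], _, acc => acc
  | v :: vs, i, acc =>
    if v = 0 then encAgo vs (i + 1) (PySem.Int.bor acc ((0b00 : Int) <<< (2 * i)))
    else if v = 1 then encAgo vs (i + 1) (PySem.Int.bor acc ((0b01 : Int) <<< (2 * i)))
    else if v = -1 then encAgo vs (i + 1) (PySem.Int.bor acc ((0b11 : Int) <<< (2 * i)))
    else acc

def encode_pitch_input (value : List Int) : Int := encAgo value 0 0

-- ===== PORT B =====
-- 'code' of Source B's branch chain; the final 'else' is Python's 'raise ValueError',
-- excluded by Pre_encode_pitch_input (value here is arbitrary)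
def pitchCode (v : Int) : Int :=
  if v = 0 then 0b00
  else if v = 1 then 0b01
  else if v = -1 then 0b11
  else 0

def encode_pitch_input_alt (value : List Int) : Int :=
  value.reverse.foldl (fun encoded v => PySem.Int.bor (encoded <<< 2) (pitchCode v)) 0

-- ===== PRECONDITION & SPEC =====
-- Pre_ excludes exactly the inputs on which Python A raises ValueError (an element not in {0, 1, -1})
def Pre_encode_pitch_input (value : List Int) : Prop :=
  ∀ v ∈ value, v = 0 ∨ v = 1 ∨ v = -1
instance (value : List Int) : Decidable (Pre_encode_pitch_input value) := by
  unfold Pre_encode_pitch_input; infer_instance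
def pvWitness_encode_pitch_input : List Int := [0, 1, -1, 1]

def Spec_encode_pitch_input (value : List Int) (out : Int) : Prop := out = encode_pitch_input_alt value
instance (value : List Int) (out : Int) : Decidable (Spec_encode_pitch_input value out) := by unfold Spec_encode_pitch_input; infer_instance

-- ===== CLAIM (what is proved, stated in full; the proofs are below) =====
def Claim_equal_encode_pitch_input : Prop := ∀ (value : List Int), Dom_encode_pitch_input value → Pre_encode_pitch_input value → Spec_encode_pitch_input value (encode_pitch_input value)

-- ===== LEMMAS AND PROOFS =====

-- Nat-valued code of a valid pitch element
def pvCodeN (v : Int) : Nat := if v = 0 then 0 else if v = 1 then 1 else if v = -1 then 3 else 0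

-- Nat mirror of A's loop (all intermediate values of A are nonneg under Pre_)
def pvGA : List Int → Nat → Nat → Nat
  | [], _, a => a
  | v :: vs, i, a => pvGA vs (i + 1) (a ||| (pvCodeN v <<< (2 * i)))

-- Nat Horner form of B
def pvHB (vs : List Int) : Nat := vs.foldr (fun v acc => (acc <<< 2) ||| pvCodeN v) 0

theorem pvGA_eq (vs : List Int) : ∀ (i a : Nat), pvGA vs i a = a ||| (pvHB vs <<< (2 * i)) := by
  induction vs with
  | nil => intro i a; simp [pvGA, pvHB, Nat.zero_shiftLeft]
  | cons v vs ih =>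
    intro i a
    simp only [pvGA, pvHB, List.foldr] at *
    rw [ih, Nat.shiftLeft_or_distrib, ← Nat.shiftLeft_add]
    have h2 : 2 + 2 * i = 2 * (i + 1) := by ring
    rw [h2, Nat.lor_assoc, Nat.lor_comm (pvCodeN v <<< (2 * i))]

-- casting bridge: Python ints here are nonneg, so bor/shift agree with Nat's
theorem pvBorShift (a c i : Nat) :
    PySem.Int.bor (a : Int) (((c : Nat) : Int) <<< (2 * i)) = ((a ||| (c <<< (2 * i)) : Nat) : Int) := by
  have h : PySem.Int.bor (a : Int) ((c <<< (2 * i) : Nat) : Int) = ((a ||| (c <<< (2 * i)) : Nat) : Int) := by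
    simp only [PySem.Int.bor_natCast]
  exact h

theorem pvBor2 (b c : Nat) : PySem.Int.bor ((b : Int) <<< 2) ((c : Nat) : Int) = (((b <<< 2) ||| c : Nat) : Int) := by
  have h : PySem.Int.bor ((b <<< 2 : Nat) : Int) ((c : Nat) : Int) = (((b <<< 2) ||| c : Nat) : Int) := by
    simp only [PySem.Int.bor_natCast]
  exact h

theorem pvA_cast (vs : List Int) (h : ∀ v ∈ vs, v = 0 ∨ v = 1 ∨ v = -1) :
    ∀ (i a : Nat), encAgo vs i (a : Int) = ((pvGA vs i a : Nat) : Int) := by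
  induction vs with
  | nil => intro i a; simp [encAgo, pvGA]
  | cons v vs ih =>
    intro i a
    have hrest : ∀ v ∈ vs, v = 0 ∨ v = 1 ∨ v = -1 := fun w hw => h w (by simp [hw])
    rcases h v (by simp) with hv | hv | hv
    · simp only [encAgo, pvGA, pvCodeN, hv]
      norm_num
      exact ih hrest (i + 1) a
    · simp only [encAgo, pvGA, pvCodeN, hv]
      norm_num
      rw [show PySem.Int.bor (a : Int) ((0b01 : Int) <<< (2 * i))
            = ((a ||| ((1 : Nat) <<< (2 * i)) : Nat) : Int) from pvBorShift a 1 i]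
      exact ih hrest (i + 1) _
    · simp only [encAgo, pvGA, pvCodeN, hv]
      norm_num
      rw [show PySem.Int.bor (a : Int) ((0b11 : Int) <<< (2 * i))
            = ((a ||| ((3 : Nat) <<< (2 * i)) : Nat) : Int) from pvBorShift a 3 i]
      exact ih hrest (i + 1) _

theorem pvStep_cast (b : Nat) (v : Int) :
    PySem.Int.bor ((b : Int) <<< 2) (pitchCode v) = (((b <<< 2) ||| pvCodeN v : Nat) : Int) := by
  unfold pitchCode pvCodeN
  split_ifs
  · exact pvBor2 b 0
  · exact pvBor2 b 1
  · exact pvBor2 b 3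
  · exact pvBor2 b 0

theorem pvB_cast (vs : List Int) :
    ∀ (a : Nat), vs.foldl (fun encoded v => PySem.Int.bor (encoded <<< 2) (pitchCode v)) (a : Int)
      = ((vs.foldl (fun a v => (a <<< 2) ||| pvCodeN v) a : Nat) : Int) := by
  induction vs with
  | nil => intro a; rfl
  | cons v vs ih =>
    intro a
    simp only [List.foldl]
    rw [pvStep_cast a v]
    exact ih _

-- ===== VERDICT (by name: the statement is the Claim_ definition above) =====
theorem encode_pitch_input_spec : Claim_equal_encode_pitch_input := by
  intro value _ hpre
  unfold Spec_encode_pitch_input encode_pitch_input encode_pitch_input_alt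
  rw [show (0 : Int) = ((0 : Nat) : Int) from rfl, pvA_cast value hpre 0 0, pvB_cast,
    List.foldl_reverse, pvGA_eq]
  simp [pvHB, Nat.shiftLeft_zero]
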